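-- pv_equiv track=rewrite | github.com/ZhangJYe/OpsCaptain | scripts/aiops/build_telemetry_evidence.py | derive_namespaces
-- ===== SOURCE A (Python) =====
-- from typing import Any, Iterable
--
-- HIPSTERSHOP_SERVICES = {
--     "adservice",
--     "cartservice",
--     "checkoutservice",
--     "currencyservice",
--     "emailservice",
--     "frontend",
--     "paymentservice",
--     "productcatalogservice",
--     "recommendationservice",
--     "redis-cart",
--     "shippingservice",
-- }
--
-- def derive_namespaces(services: Iterable[str], instances: Iterable[str]) -> list[str]:
--     tokens = {item.lower() for item in services if item}
--     tokens.update(item.lower() for item in instances if item)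
--     if any("tidb" in item or item == "pd" for item in tokens):
--         return ["tidb"]
--     if any(item in HIPSTERSHOP_SERVICES for item in tokens):
--         return ["hipstershop"]
--     return []
-- ===== SOURCE B (Python) =====
-- HIPSTERSHOP_SERVICES = {
--     "adservice",
--     "cartservice",
--     "checkoutservice",
--     "currencyservice",
--     "emailservice",
--     "frontend",
--     "paymentservice",
--     "productcatalogservice",
--     "recommendationservice",
--     "redis-cart",
--     "shippingservice",
-- }
--
--
-- def _severity(item):
--     """Score one raw token: 2 = TiDB evidence, 1 = Hipstershop evidence, 0 = nothing."""
--     if not item: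
--         return 0
--     token = item.lower()
--     if "tidb" in token or token == "pd":
--         return 2
--     if token in HIPSTERSHOP_SERVICES:
--         return 1
--     return 0
--
--
-- def derive_namespaces(services, instances):
--     best = max(map(_severity, services), default=0)
--     best = max(best, max(map(_severity, instances), default=0))
--     return [[], ["hipstershop"], ["tidb"]][best]
-- ===== Notes on version B (the rewrite author's own statement) =====
-- stated objective: alternative
-- what changed: Replaces A's token-set construction plus prioritized early-return any-scans with a numeric severity scoring: each raw token is mapped to a rank (2=tidb, 1=hipstershop, 0=none), the maximum rank over both iterables is taken, and the answer is read from a rank-indexed table.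
import Mathlib
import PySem

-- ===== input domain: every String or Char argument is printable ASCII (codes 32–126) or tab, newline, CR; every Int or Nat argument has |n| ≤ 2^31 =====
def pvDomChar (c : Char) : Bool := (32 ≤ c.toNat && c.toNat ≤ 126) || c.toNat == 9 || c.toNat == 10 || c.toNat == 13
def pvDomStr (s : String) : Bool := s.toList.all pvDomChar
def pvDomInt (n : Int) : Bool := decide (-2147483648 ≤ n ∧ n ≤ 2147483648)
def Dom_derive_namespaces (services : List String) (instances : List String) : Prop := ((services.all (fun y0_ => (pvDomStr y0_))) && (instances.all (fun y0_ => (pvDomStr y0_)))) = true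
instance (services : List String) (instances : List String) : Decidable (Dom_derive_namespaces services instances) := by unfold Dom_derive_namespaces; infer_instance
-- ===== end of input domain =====

-- B replaces A's "build a lowered-token set, then two prioritized any-scans" by numeric severity
-- scoring: each raw token gets a rank (2 = tidb, 1 = hipstershop, 0 = nothing), the maximum rank
-- over both inputs is taken, and the answer is read from a rank-indexed table (objective: alternative).

-- ===== PORT A =====
def HIPSTERSHOP_SERVICES : PySem.Set String := PySem.Set.ofList
  ["adservice", "cartservice", "checkoutservice", "currencyservice", "emailservice",
   "frontend", "paymentservice", "productcatalogservice", "recommendationservice",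
   "redis-cart", "shippingservice"]

def derive_namespaces (services : List String) (instances : List String) : List String :=
  let tokens0 : PySem.Set String :=
    PySem.Set.ofList ((services.filter (fun item => item ≠ "")).map PySem.Str.lower)
  let tokens : PySem.Set String :=
    PySem.Set.update tokens0 ((instances.filter (fun item => item ≠ "")).map PySem.Str.lower)
  if tokens.any (fun item => PySem.Str.isIn "tidb" item || item == "pd") then ["tidb"]
  else if tokens.any (fun item => PySem.Set.contains HIPSTERSHOP_SERVICES item) then ["hipstershop"]
  else []

-- ===== PORT B =====
-- Source B's _severity: rank of one raw token
def pvSeverity (item : String) : Int :=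
  if item = "" then 0
  else
    let token := PySem.Str.lower item
    if PySem.Str.isIn "tidb" token || token == "pd" then 2
    else if PySem.Set.contains HIPSTERSHOP_SERVICES token then 1
    else 0

def derive_namespaces_alt (services : List String) (instances : List String) : List String :=
  let best0 := (services.map pvSeverity).foldl max 0   -- max(map(_severity, services), default=0)
  let best := max best0 ((instances.map pvSeverity).foldl max 0)
  -- [[], ["hipstershop"], ["tidb"]][best]; best ∈ {0,1,2}, always in range, so 'none' is unreachable
  (PySem.List.pyGet? [([] : List String), ["hipstershop"], ["tidb"]] best).getD []

-- ===== PRECONDITION & SPEC =====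
def Spec_derive_namespaces (services : List String) (instances : List String) (out : List String) : Prop := out = derive_namespaces_alt services instances
instance (services : List String) (instances : List String) (out : List String) : Decidable (Spec_derive_namespaces services instances out) := by unfold Spec_derive_namespaces; infer_instance

-- ===== CLAIM (what is proved, stated in full; the proofs are below) =====
def Claim_equal_derive_namespaces : Prop := ∀ (services : List String) (instances : List String), Dom_derive_namespaces services instances → Spec_derive_namespaces services instances (derive_namespaces services instances)

-- ===== LEMMAS AND PROOFS =====

-- B's max-fold over severities equals the prioritized if-chain over the two any-flags
theorem pvFoldMax (l : List String) (b : Int) (hb : 0 ≤ b) :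
    (l.map pvSeverity).foldl max b
    = b ⊔ (if l.any (fun it => it ≠ "" && (PySem.Str.isIn "tidb" (PySem.Str.lower it) || PySem.Str.lower it == "pd")) then 2
           else if l.any (fun it => it ≠ "" && PySem.Set.contains HIPSTERSHOP_SERVICES (PySem.Str.lower it)) then 1
           else 0) := by
  induction l generalizing b with
  | nil => simp; omega
  | cons x xs ih =>
      by_cases hx : x = ""
      · subst hx
        simp only [List.map_cons, List.foldl_cons, List.any_cons,
          show pvSeverity "" = 0 from rfl,
          show (decide (("" : String) ≠ "")) = false from rfl, Bool.false_and, Bool.false_or]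
        rw [ih _ (by omega), show max b 0 = b by omega]
      · have hdx : (decide (x ≠ "")) = true := by simp [hx]
        cases h1 : (PySem.Str.isIn "tidb" (PySem.Str.lower x) || PySem.Str.lower x == "pd") with
        | true =>
            have hs : pvSeverity x = 2 := by
              simp only [pvSeverity]; rw [if_neg hx, h1]; simp
            simp only [List.map_cons, List.foldl_cons, hs, List.any_cons, h1, hdx,
              Bool.true_and, Bool.true_or, if_true]
            rw [ih _ (by omega)]
            split_ifs <;> omega
        | false =>
            cases h2 : PySem.Set.contains HIPSTERSHOP_SERVICES (PySem.Str.lower x) with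
            | true =>
                have hs : pvSeverity x = 1 := by
                  simp only [pvSeverity]; rw [if_neg hx, h1, h2]; simp
                simp only [List.map_cons, List.foldl_cons, hs, List.any_cons, h1, h2, hdx,
                  Bool.true_and, Bool.and_false, Bool.false_or, Bool.true_or]
                rw [ih _ (by omega)]
                split_ifs <;> omega
            | false =>
                have hs : pvSeverity x = 0 := by
                  simp only [pvSeverity]; rw [if_neg hx, h1, h2]; simp
                simp only [List.map_cons, List.foldl_cons, hs, List.any_cons, h1, h2, hdx,
                  Bool.and_false, Bool.false_or]
                rw [ih _ (by omega), show max b 0 = b by omega]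

-- any over A's token set equals any over the underlying (filtered, lowered) concatenation
theorem pvSet_any (services instances : List String) (p : String → Bool) :
    (PySem.Set.update
        (PySem.Set.ofList ((services.filter (fun item => item ≠ "")).map PySem.Str.lower))
        ((instances.filter (fun item => item ≠ "")).map PySem.Str.lower)).any p
    = (services ++ instances).any (fun it => it ≠ "" && p (PySem.Str.lower it)) := by
  rw [Bool.eq_iff_iff]
  simp only [List.any_eq_true, PySem.Set.update_eq_append_filter, List.mem_append,
    List.mem_filter, PySem.Set.mem_ofList, List.mem_map]
  constructor
  · rintro ⟨x, hx, hp⟩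
    rcases hx with ⟨t, ⟨ht, hne⟩, rfl⟩ | ⟨⟨t, ⟨ht, hne⟩, rfl⟩, -⟩
    · exact ⟨t, Or.inl ht, by simp_all⟩
    · exact ⟨t, Or.inr ht, by simp_all⟩
  · rintro ⟨t, ht, hp⟩
    simp only [Bool.and_eq_true, decide_eq_true_eq] at hp
    rcases ht with ht | ht
    · exact ⟨PySem.Str.lower t, Or.inl ⟨t, ⟨ht, by simp [hp.1]⟩, rfl⟩, hp.2⟩
    · by_cases hm : ∃ s ∈ services.filter (fun item => item ≠ ""), PySem.Str.lower s = PySem.Str.lower t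
      · rcases hm with ⟨s, hs, hst⟩
        simp only [List.mem_filter, decide_eq_true_eq] at hs
        exact ⟨PySem.Str.lower s, Or.inl ⟨s, ⟨hs.1, by simp [hs.2]⟩, rfl⟩, by rw [hst]; exact hp.2⟩
      · refine ⟨PySem.Str.lower t, Or.inr ⟨⟨t, ⟨ht, by simp [hp.1]⟩, rfl⟩, ?_⟩, hp.2⟩
        simp only [PySem.Set.contains_eq_listContains, Bool.not_eq_eq_eq_not, Bool.not_true,
          List.contains_eq_mem, decide_eq_false_iff_not, PySem.Set.mem_ofList, List.mem_map]
        rintro ⟨s, hs, hst⟩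
        exact hm ⟨s, hs, hst⟩

-- ===== VERDICT (by name: the statement is the Claim_ definition above) =====
theorem derive_namespaces_spec : Claim_equal_derive_namespaces := by
  intro services instances _
  simp only [Spec_derive_namespaces, derive_namespaces, derive_namespaces_alt]
  rw [pvFoldMax services 0 le_rfl, pvFoldMax instances 0 le_rfl]
  rw [pvSet_any services instances (fun t => PySem.Str.isIn "tidb" t || t == "pd"),
      pvSet_any services instances (fun t => PySem.Set.contains HIPSTERSHOP_SERVICES t)]
  simp only [List.any_append]
  cases hTs : services.any (fun it => it ≠ "" && (PySem.Str.isIn "tidb" (PySem.Str.lower it) || PySem.Str.lower it == "pd")) <;>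
  cases hTi : instances.any (fun it => it ≠ "" && (PySem.Str.isIn "tidb" (PySem.Str.lower it) || PySem.Str.lower it == "pd")) <;>
  cases hHs : services.any (fun it => it ≠ "" && PySem.Set.contains HIPSTERSHOP_SERVICES (PySem.Str.lower it)) <;>
  cases hHi : instances.any (fun it => it ≠ "" && PySem.Set.contains HIPSTERSHOP_SERVICES (PySem.Str.lower it)) <;>
    norm_num [PySem.List.pyGet?, PySem.List.pyIdx?] <;> rfl
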